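-- pv_equiv track=rewrite | github.com/OzYossarian/Kandel | main/codes/non_convex_color_codes/utils.py | generate_triangular_lattice
-- ===== SOURCE A (Python) =====
-- import itertools as it
-- from typing import Tuple
--
-- def generate_triangular_lattice(t, center: Tuple[int], orientation_flipped: bool = False) -> set:
--     """
--     """
--     coordinates = set()
--
--     if orientation_flipped:
--         max_val = -3*t - 1
--         sum_val = -3*t
--         uncorrected_center = (-t, -t, -t)
--         step = -1
--
--     else:
--         max_val = 3*t + 1
--         sum_val = 3*t
--         uncorrected_center = (t, t, t)
--         step = 1
--
--     coordinate_shift = tuple(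
--         [center[i] - uncorrected_center[i] for i in range(3)])
--     for combo in it.combinations_with_replacement(range(0, max_val, step), 3):
--         if sum(combo) == sum_val:
--             for perm in it.permutations(combo):
--                 coordinates.add((perm[0] + coordinate_shift[0],
--                                 perm[1] + coordinate_shift[1], perm[2] + coordinate_shift[2]))
--     return (coordinates)
-- ===== SOURCE B (Python) =====
-- def generate_triangular_lattice(t, center, orientation_flipped=False):
--     """Solve the third coordinate directly instead of filtering all triples: O(t^2)."""
--     s = -1 if orientation_flipped else 1
--     shift = (center[0] - s * t, center[1] - s * t, center[2] - s * t)
--     coordinates = set()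
--     for p0 in range(0, t + 1):
--         for p1 in range(p0, (3 * t - p0) // 2 + 1):
--             p2 = 3 * t - p0 - p1
--             a, b, c = s * p0, s * p1, s * p2
--             for q in ((a, b, c), (a, c, b), (b, a, c), (b, c, a), (c, a, b), (c, b, a)):
--                 coordinates.add((q[0] + shift[0], q[1] + shift[1], q[2] + shift[2]))
--     return coordinates
-- ===== Notes on version B (the rewrite author's own statement) =====
-- stated objective: faster
-- what changed: Instead of enumerating all O(t^3) 3-combinations-with-replacement of the coordinate range and filtering by their sum, B loops over the two smaller coordinates only, solves the third from the fixed sum, and emits the six permutations of each solution in place.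
import Mathlib
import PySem

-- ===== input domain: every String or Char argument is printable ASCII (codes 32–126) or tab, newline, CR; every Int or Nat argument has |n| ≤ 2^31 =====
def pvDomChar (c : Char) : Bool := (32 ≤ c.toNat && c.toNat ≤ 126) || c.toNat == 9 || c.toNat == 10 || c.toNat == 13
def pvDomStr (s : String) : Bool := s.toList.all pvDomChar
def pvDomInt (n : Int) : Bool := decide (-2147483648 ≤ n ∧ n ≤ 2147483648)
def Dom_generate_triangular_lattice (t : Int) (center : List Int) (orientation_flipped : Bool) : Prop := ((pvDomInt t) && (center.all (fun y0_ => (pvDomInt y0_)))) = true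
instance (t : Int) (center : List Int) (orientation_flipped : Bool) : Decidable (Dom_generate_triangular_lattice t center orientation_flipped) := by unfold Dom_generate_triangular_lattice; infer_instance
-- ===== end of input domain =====

-- B replaces A's scan of all 3-combinations of the range filtered by their sum with a double
-- loop that solves for the third coordinate directly and emits the 6 permutations in place.

-- ===== PORT A =====
-- itertools.combinations_with_replacement(l, 3), in itertools' order
def pvCwr2 : List Int → List (Int × Int)
  | [] => []
  | x :: xs => ((x :: xs).map (fun y => (x, y))) ++ pvCwr2 xs

def pvCwr3 : List Int → List (Int × Int × Int)
  | [] => []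
  | x :: xs => ((pvCwr2 (x :: xs)).map (fun p => (x, p.1, p.2))) ++ pvCwr3 xs

def generate_triangular_lattice (t : Int) (center : List Int) (orientation_flipped : Bool) : List (Int × Int × Int) :=
  let data : Int × Int × (Int × Int × Int) × Int :=
    if orientation_flipped then (-(3*t) - 1, -(3*t), (-t, -t, -t), -1)
    else (3*t + 1, 3*t, (t, t, t), 1)
  let max_val := data.1
  let sum_val := data.2.1
  let unc := data.2.2.1
  let step := data.2.2.2
  let sh : Int × Int × Int :=
    (PySem.List.pyGetD center 0 0 - unc.1,
     PySem.List.pyGetD center 1 0 - unc.2.1,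
     PySem.List.pyGetD center 2 0 - unc.2.2)
  (pvCwr3 (PySem.List.pyRange 0 max_val step)).foldl
    (fun coords combo =>
      if combo.1 + combo.2.1 + combo.2.2 = sum_val then
        (PySem.List.permutations [combo.1, combo.2.1, combo.2.2] 3).foldl
          (fun coords perm =>
            PySem.Set.add coords
              (PySem.List.pyGetD perm 0 0 + sh.1,
               PySem.List.pyGetD perm 1 0 + sh.2.1,
               PySem.List.pyGetD perm 2 0 + sh.2.2))
          coords
      else coords)
    PySem.Set.empty

-- ===== PORT B =====
def generate_triangular_lattice_alt (t : Int) (center : List Int) (orientation_flipped : Bool) : List (Int × Int × Int) :=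
  let s : Int := if orientation_flipped then -1 else 1
  let sh : Int × Int × Int :=
    (PySem.List.pyGetD center 0 0 - s*t,
     PySem.List.pyGetD center 1 0 - s*t,
     PySem.List.pyGetD center 2 0 - s*t)
  (PySem.List.pyRange 0 (t+1) 1).foldl
    (fun coords p0 =>
      (PySem.List.pyRange p0 (PySem.Int.floordiv (3*t - p0) 2 + 1) 1).foldl
        (fun coords p1 =>
          let p2 := 3*t - p0 - p1
          let a := s*p0
          let b := s*p1
          let c := s*p2
          ([(a,b,c),(a,c,b),(b,a,c),(b,c,a),(c,a,b),(c,b,a)]).foldl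
            (fun coords q => PySem.Set.add coords (q.1 + sh.1, q.2.1 + sh.2.1, q.2.2 + sh.2.2))
            coords)
        coords)
    PySem.Set.empty

-- ===== PRECONDITION & SPEC =====
-- Python A raises IndexError on center[i] (i = 0,1,2) when center has fewer than 3 entries.
def Pre_generate_triangular_lattice (t : Int) (center : List Int) (orientation_flipped : Bool) : Prop :=
  3 ≤ center.length
instance (t : Int) (center : List Int) (orientation_flipped : Bool) : Decidable (Pre_generate_triangular_lattice t center orientation_flipped) := by unfold Pre_generate_triangular_lattice; infer_instance
def pvWitness_generate_triangular_lattice : Int × List Int × Bool := (1, [0, 0, 0], false)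

def Spec_generate_triangular_lattice (t : Int) (center : List Int) (orientation_flipped : Bool) (out : List (Int × Int × Int)) : Prop := out = generate_triangular_lattice_alt t center orientation_flipped
instance (t : Int) (center : List Int) (orientation_flipped : Bool) (out : List (Int × Int × Int)) : Decidable (Spec_generate_triangular_lattice t center orientation_flipped out) := by unfold Spec_generate_triangular_lattice; infer_instance

-- ===== CLAIM (what is proved, stated in full; the proofs are below) =====
def Claim_equal_generate_triangular_lattice : Prop := ∀ (t : Int) (center : List Int) (orientation_flipped : Bool), Dom_generate_triangular_lattice t center orientation_flipped → Pre_generate_triangular_lattice t center orientation_flipped → Spec_generate_triangular_lattice t center orientation_flipped (generate_triangular_lattice t center orientation_flipped)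

-- ===== LEMMAS AND PROOFS =====

-- the insertion both loops perform for one permutation, shift split into components
def pvAdd (s1 s2 s3 : Int) (coords : PySem.Set (Int × Int × Int)) (q : Int × Int × Int) : PySem.Set (Int × Int × Int) :=
  PySem.Set.add coords (q.1 + s1, q.2.1 + s2, q.2.2 + s3)

-- the 6 permutations of a triple, in itertools.permutations order
def pvPermList (c : Int × Int × Int) : List (Int × Int × Int) :=
  [(c.1, c.2.1, c.2.2), (c.1, c.2.2, c.2.1), (c.2.1, c.1, c.2.2),
   (c.2.1, c.2.2, c.1), (c.2.2, c.1, c.2.1), (c.2.2, c.2.1, c.1)]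

def pvAdd6 (s1 s2 s3 : Int) (coords : PySem.Set (Int × Int × Int)) (c : Int × Int × Int) : PySem.Set (Int × Int × Int) :=
  (pvPermList c).foldl (pvAdd s1 s2 s3) coords

-- B's inner loop, as a list of combos (third coordinate solved from the sum)
def pvInner (t p0 : Int) : List (Int × Int × Int) :=
  (PySem.List.pyRange p0 (PySem.Int.floordiv (3*t - p0) 2 + 1) 1).map (fun p1 => (p0, p1, 3*t - p0 - p1))

lemma pv_innerA_eq (s1 s2 s3 : Int) (coords : PySem.Set (Int × Int × Int)) (c : Int × Int × Int) :
    (PySem.List.permutations [c.1, c.2.1, c.2.2] 3).foldl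
      (fun coords perm =>
        PySem.Set.add coords
          (PySem.List.pyGetD perm 0 0 + s1,
           PySem.List.pyGetD perm 1 0 + s2,
           PySem.List.pyGetD perm 2 0 + s3)) coords = pvAdd6 s1 s2 s3 coords c := rfl

lemma pv_innerB_eq (s1 s2 s3 : Int) (coords : PySem.Set (Int × Int × Int)) (a b c : Int) :
    ([(a,b,c),(a,c,b),(b,a,c),(b,c,a),(c,a,b),(c,b,a)]).foldl
      (fun coords q => PySem.Set.add coords (q.1 + s1, q.2.1 + s2, q.2.2 + s3)) coords
    = pvAdd6 s1 s2 s3 coords (a, b, c) := rfl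

lemma pv_filter_range (a b v : Int) :
    (PySem.List.pyRange a b 1).filter (fun z => decide (z = v)) = if a ≤ v ∧ v < b then [v] else [] := by
  by_cases h : b ≤ a
  · rw [PySem.List.pyRange_one_eq_nil h]
    simp; omega
  · rw [PySem.List.pyRange_one_cons (by omega)]
    have ih := pv_filter_range (a+1) b v
    simp only [List.filter_cons, decide_eq_true_eq, ih]
    split_ifs <;> simp_all <;> omega
termination_by (b - a).toNat
decreasing_by omega

lemma pv_fd2 (a : Int) : 2 * PySem.Int.floordiv a 2 ≤ a ∧ a < 2 * PySem.Int.floordiv a 2 + 2 := by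
  have h1 := (PySem.Int.le_floordiv_iff_mul_le (a := a) (b := 2) (q := PySem.Int.floordiv a 2) (by omega)).mp le_rfl
  have h2 := (PySem.Int.floordiv_lt_iff_lt_mul (a := a) (b := 2) (q := PySem.Int.floordiv a 2 + 1) (by omega)).mp (by omega)
  omega

lemma pv_cwr2_map (f : Int → Int) (l : List Int) :
    pvCwr2 (l.map f) = (pvCwr2 l).map (fun p => (f p.1, f p.2)) := by
  induction l with
  | nil => rfl
  | cons x xs ih => simp [pvCwr2, ih, List.map_map]

lemma pv_cwr3_map (f : Int → Int) (l : List Int) :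
    pvCwr3 (l.map f) = (pvCwr3 l).map (fun c => (f c.1, f c.2.1, f c.2.2)) := by
  induction l with
  | nil => rfl
  | cons x xs ih =>
      show (pvCwr2 (List.map f (x :: xs))).map _ ++ pvCwr3 (List.map f xs) = _
      rw [pv_cwr2_map, ih]
      simp [pvCwr3, List.map_map]

lemma pv_neg_range (t : Int) :
    PySem.List.pyRange 0 (-(3*t) - 1) (-1) = (PySem.List.pyRange 0 (3*t+1) 1).map (fun z => -z) := by
  rw [PySem.List.pyRange_neg_one, PySem.List.pyRange_one]
  have h : (0 - (-(3*t) - 1)).toNat = (3*t + 1 - 0).toNat := by omega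
  rw [h, List.map_map]
  exact List.map_congr_left (fun k _ => by simp)

lemma pv_cwr2_filter (t x y : Int) (ht : 0 ≤ t) (hx : 0 ≤ x) (hy : 0 ≤ y) :
    (pvCwr2 (PySem.List.pyRange y (3*t+1) 1)).filter (fun p => decide (x + p.1 + p.2 = 3*t))
    = (PySem.List.pyRange y (PySem.Int.floordiv (3*t - x) 2 + 1) 1).map (fun p1 => (p1, 3*t - x - p1)) := by
  have hfd := pv_fd2 (3*t - x)
  by_cases h : 3*t + 1 ≤ y
  · rw [PySem.List.pyRange_one_eq_nil h, PySem.List.pyRange_one_eq_nil (by omega)]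
    rfl
  · have hcons := PySem.List.pyRange_one_cons (a := y) (b := 3*t+1) (by omega)
    have ih := pv_cwr2_filter t x (y+1) ht hx (by omega)
    rw [hcons]
    show List.filter _ (((y :: PySem.List.pyRange (y+1) (3*t+1) 1).map (fun z => (y, z))) ++ _) = _
    rw [← hcons, List.filter_append, List.filter_map, ih]
    have hpred : ((fun p => decide (x + p.1 + p.2 = 3*t)) ∘ (fun z => (y, z))) = (fun z => decide (z = 3*t - x - y)) := by
      funext z; simp only [Function.comp]; rw [decide_eq_decide]; omega
    rw [hpred, pv_filter_range]
    by_cases hc : 2*y ≤ 3*t - x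
    · rw [if_pos (by omega)]
      rw [PySem.List.pyRange_one_cons (a := y) (b := PySem.Int.floordiv (3*t-x) 2 + 1) (by omega)]
      simp
    · rw [if_neg (by omega), PySem.List.pyRange_one_eq_nil (a := y) (by omega),
          PySem.List.pyRange_one_eq_nil (a := y+1) (by omega)]
      simp
termination_by (3*t + 1 - y).toNat
decreasing_by omega

lemma pv_cwr3_filter (t x : Int) (ht : 0 ≤ t) (hx : 0 ≤ x) :
    (pvCwr3 (PySem.List.pyRange x (3*t+1) 1)).filter (fun c => decide (c.1 + c.2.1 + c.2.2 = 3*t))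
    = (PySem.List.pyRange x (t+1) 1).flatMap (pvInner t) := by
  have hfd := pv_fd2 (3*t - x)
  by_cases h : 3*t + 1 ≤ x
  · rw [PySem.List.pyRange_one_eq_nil h, PySem.List.pyRange_one_eq_nil (by omega)]
    rfl
  · have hcons := PySem.List.pyRange_one_cons (a := x) (b := 3*t+1) (by omega)
    have ih := pv_cwr3_filter t (x+1) ht (by omega)
    rw [hcons]
    show List.filter _ ((pvCwr2 (x :: PySem.List.pyRange (x+1) (3*t+1) 1)).map (fun p => (x, p.1, p.2)) ++ _) = _
    rw [← hcons, List.filter_append, List.filter_map, ih]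
    have hpred : ((fun c : Int × Int × Int => decide (c.1 + c.2.1 + c.2.2 = 3*t)) ∘ (fun p : Int × Int => (x, p.1, p.2))) = (fun p : Int × Int => decide (x + p.1 + p.2 = 3*t)) := by
      funext p; simp [Function.comp]
    rw [hpred, pv_cwr2_filter t x x ht hx hx]
    by_cases hc : x ≤ t
    · rw [PySem.List.pyRange_one_cons (a := x) (b := t+1) (by omega)]
      rw [List.flatMap_cons]
      simp [pvInner, List.map_map]
    · rw [PySem.List.pyRange_one_eq_nil (a := x) (b := t+1) (by omega),
          PySem.List.pyRange_one_eq_nil (a := x) (b := PySem.Int.floordiv (3*t-x) 2 + 1) (by omega),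
          PySem.List.pyRange_one_eq_nil (a := x+1) (b := t+1) (by omega)]
      rfl
termination_by (3*t + 1 - x).toNat
decreasing_by omega

lemma pv_main (t : Int) (center : List Int) (fl : Bool) :
    generate_triangular_lattice t center fl = generate_triangular_lattice_alt t center fl := by
  rcases Int.lt_or_le t 0 with hneg | ht
  · cases fl <;>
      simp only [generate_triangular_lattice, generate_triangular_lattice_alt,
        Bool.false_eq_true, if_true, if_false] <;>
      rw [show PySem.List.pyRange 0 (t+1) 1 = [] from PySem.List.pyRange_one_eq_nil (by omega)] <;>
      [rw [show PySem.List.pyRange 0 (3*t+1) 1 = [] from PySem.List.pyRange_one_eq_nil (by omega)];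
       rw [show PySem.List.pyRange 0 (-(3*t)-1) (-1) = [] from PySem.List.pyRange_neg_one_eq_nil (by omega)]] <;>
      rfl
  · cases fl
    · -- not flipped
      simp only [generate_triangular_lattice, generate_triangular_lattice_alt,
        Bool.false_eq_true, if_false, one_mul]
      simp only [pv_innerA_eq, pv_innerB_eq]
      rw [PySem.List.foldl_ite_eq_foldl_filter, pv_cwr3_filter t 0 ht le_rfl,
        List.foldl_flatMap]
      apply PySem.List.foldl_congr_mem
      intro acc p0 _hp0
      rw [pvInner, List.foldl_map]
    · -- flipped
      simp only [generate_triangular_lattice, generate_triangular_lattice_alt, if_true, neg_one_mul]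
      simp only [pv_innerA_eq, pv_innerB_eq]
      rw [PySem.List.foldl_ite_eq_foldl_filter, pv_neg_range, pv_cwr3_map,
        List.filter_map]
      have hpred : ((fun c : Int × Int × Int => decide (c.1 + c.2.1 + c.2.2 = -(3*t))) ∘ (fun c : Int × Int × Int => (-c.1, -c.2.1, -c.2.2))) = (fun c : Int × Int × Int => decide (c.1 + c.2.1 + c.2.2 = 3*t)) := by
        funext c; simp only [Function.comp]; rw [decide_eq_decide]; omega
      rw [hpred, pv_cwr3_filter t 0 ht le_rfl, List.map_flatMap, List.foldl_flatMap]
      apply PySem.List.foldl_congr_mem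
      intro acc p0 _hp0
      rw [pvInner, List.map_map, List.foldl_map]
      rfl

-- ===== VERDICT (by name: the statement is the Claim_ definition above) =====
theorem generate_triangular_lattice_spec : Claim_equal_generate_triangular_lattice := by
  intro t center orientation_flipped _hdom _hpre
  unfold Spec_generate_triangular_lattice
  exact pv_main t center orientation_flipped
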